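-- pv_equiv track=rewrite | github.com/AldoLunaBueno/Algorithmic_Thinking | 3_memoization_and_dynamic_programming/homer_simpson/algorithms/dynamic_prog.py | solve_t
-- ===== SOURCE A (Python) =====
-- def solve_t(m, n, t):
--     dp = [0]*(t+1)
--     for i in range(1, t+1):
--         first =  dp[i-m] if i >= m else -1
--         second = dp[i-n] if i >= n else -1
--         if first == -1 and second == -1:
--             dp[i] = -1
--         else:
--             dp[i] = max(first, second) + 1
--     return dp
-- ===== SOURCE B (Python) =====
-- def solve_t(m, n, t):
--     if t < 0:
--         return []
--     dp = [-1] * (t + 1)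
--     for a in range(t // m + 1):
--         for b in range((t - a * m) // n + 1):
--             s = a * m + b * n
--             if a + b > dp[s]:
--                 dp[s] = a + b
--     return dp
-- ===== Notes on version B (the rewrite author's own statement) =====
-- stated objective: alternative
-- what changed: Replaced the DP recurrence (dp[i] computed from the already-filled cells dp[i-m], dp[i-n]) by direct exhaustive enumeration of every representation: for all pairs (a,b) with a*m+b*n <= t it records max(a+b) at index a*m+b*n, never reading a previously computed answer; unrepresentable cells keep -1.
-- outside the precondition, e.g. on solve_t(0, 2, 4): A returns [0, 1, 1, 2, 2], B raises ZeroDivisionError; on solve_t(-1, 2, 2): A raises IndexError, B returns [-1, -1, -1]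
import Mathlib
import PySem

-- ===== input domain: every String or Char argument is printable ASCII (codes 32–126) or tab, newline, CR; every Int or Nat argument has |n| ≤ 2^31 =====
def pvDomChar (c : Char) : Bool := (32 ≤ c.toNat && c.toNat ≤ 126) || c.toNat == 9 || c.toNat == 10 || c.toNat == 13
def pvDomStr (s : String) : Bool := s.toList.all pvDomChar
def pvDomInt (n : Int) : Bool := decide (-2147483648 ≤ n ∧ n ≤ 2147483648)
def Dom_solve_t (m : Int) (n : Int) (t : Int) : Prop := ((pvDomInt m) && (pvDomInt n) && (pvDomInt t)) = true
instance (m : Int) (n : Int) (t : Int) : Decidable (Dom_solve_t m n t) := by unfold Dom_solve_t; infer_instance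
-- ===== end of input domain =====

-- B replaces A's DP recurrence (dp[i] read from dp[i-m], dp[i-n]) by direct enumeration of
-- every representation pair (a,b) with a*m+b*n ≤ t, keeping the maximal a+b per sum; it reads
-- no previously computed answer (different algorithm, not claimed faster).

-- ===== PORT A =====
-- pyGetD is used for dp[i-m] / dp[i-n]: under Pre_ (m,n ≥ 1) the guarded index is always in range.
def solve_t (m : Int) (n : Int) (t : Int) : List Int :=
  let dp := List.replicate (t + 1).toNat (0 : Int)
  (PySem.List.pyRange 1 (t + 1) 1).foldl
    (fun dp i =>
      let first := if i ≥ m then PySem.List.pyGetD dp (i - m) 0 else -1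
      let second := if i ≥ n then PySem.List.pyGetD dp (i - n) 0 else -1
      if first = -1 ∧ second = -1 then PySem.List.pySetD dp i (-1)
      else PySem.List.pySetD dp i (max first second + 1))
    dp

-- ===== PORT B =====
def solve_t_alt (m : Int) (n : Int) (t : Int) : List Int :=
  if t < 0 then []
  else
    (PySem.List.pyRange 0 (PySem.Int.floordiv t m + 1) 1).foldl
      (fun dp a =>
        (PySem.List.pyRange 0 (PySem.Int.floordiv (t - a * m) n + 1) 1).foldl
          (fun dp b =>
            let s := a * m + b * n
            if a + b > PySem.List.pyGetD dp s 0 then PySem.List.pySetD dp s (a + b) else dp)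
          dp)
      (List.replicate (t + 1).toNat (-1 : Int))

-- ===== PRECONDITION & SPEC =====
-- Pre_ excludes step sizes m ≤ 0 or n ≤ 0 when t ≥ 0: there A either raises IndexError
-- (a negative step reaches an out-of-range index) or returns an accidental value from reading
-- dp[i] before it is written (zero step), while B's enumeration divides by m and n
-- (ZeroDivisionError at 0, empty/short enumeration for negatives); for t < 0 both return []
-- whatever m and n are, so those inputs stay inside.
def Pre_solve_t (m : Int) (n : Int) (t : Int) : Prop := (1 ≤ m ∧ 1 ≤ n) ∨ t < 0
instance (m : Int) (n : Int) (t : Int) : Decidable (Pre_solve_t m n t) := by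
  unfold Pre_solve_t; infer_instance

def pvWitness_solve_t : Int × Int × Int := (3, 5, 13)

def Spec_solve_t (m : Int) (n : Int) (t : Int) (out : List Int) : Prop := out = solve_t_alt m n t
instance (m : Int) (n : Int) (t : Int) (out : List Int) : Decidable (Spec_solve_t m n t out) := by
  unfold Spec_solve_t; infer_instance

-- ===== CLAIM (what is proved, stated in full; the proofs are below) =====
def Claim_equal_solve_t : Prop :=
  ∀ (m : Int) (n : Int) (t : Int), Dom_solve_t m n t → Pre_solve_t m n t →
    Spec_solve_t m n t (solve_t m n t)

-- ===== LEMMAS AND PROOFS =====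

-- The value A's DP computes at each cell (proof-side description of A's recurrence).
def F (m n : Nat) : Nat → Int
  | 0 => 0
  | (i+1) =>
    let a := if _h : 0 < m ∧ m ≤ i + 1 then F m n (i + 1 - m) else -1
    let b := if _h : 0 < n ∧ n ≤ i + 1 then F m n (i + 1 - n) else -1
    if a = -1 ∧ b = -1 then -1 else max a b + 1
decreasing_by all_goals omega

lemma F_ge (m n : Nat) : ∀ i, -1 ≤ F m n i := by
  intro i
  induction i using Nat.strong_induction_on with
  | _ i ih =>
    cases i with
    | zero => simp [F]
    | succ j =>
      rw [F]
      split_ifs with h1 h2 h3 <;>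
        (try have ham := ih (j + 1 - m) (by omega)) <;>
        (try have han := ih (j + 1 - n) (by omega)) <;>
        omega

-- a mapped function updated at one point (proof-side description of one list write)
def upd (g : Nat → Int) (jx : Nat) (x : Int) : Nat → Int :=
  fun j => if j = jx then x else g j

-- `set` on a map over `range` rewrites the mapped function at one point.
lemma set_map_range {N j : Nat} (g : Nat → Int) (x : Int) (_hj : j < N) :
    ((List.range N).map g).set j x = (List.range N).map (upd g j x) := by
  apply List.ext_getElem
  · simp
  · intro i h1 h2
    simp only [List.getElem_set, List.getElem_map, List.getElem_range, upd]
    by_cases h : i = j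
    · simp [h]
    · rw [if_neg (by omega), if_neg (by omega)]

-- reading a mapped range list through pyGetD
lemma pyGetD_map_range (g : Nat → Int) (N : Nat) (i : Int) (h0 : 0 ≤ i) (hi : i < (N : Int)) :
    PySem.List.pyGetD ((List.range N).map g) i 0 = g i.toNat := by
  rw [PySem.List.pyGetD_eq_getElem _ _ h0 (by simpa using hi)]
  simp

-- A's table contents after the first k iterations
def G (m n k j : Nat) : Int := if j ≤ k then F m n j else 0

-- ===== the (port A) loop invariant =====
lemma pull_inv (m n t : Int) (hm : 1 ≤ m) (hn : 1 ≤ n) (_ht : 0 ≤ t) (k : Nat)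
    (hk : k ≤ t.toNat) :
    (PySem.List.pyRange 1 ((k : Int) + 1) 1).foldl
      (fun dp i =>
        if (if i ≥ m then PySem.List.pyGetD dp (i - m) 0 else -1) = -1 ∧
           (if i ≥ n then PySem.List.pyGetD dp (i - n) 0 else -1) = -1 then
          PySem.List.pySetD dp i (-1)
        else
          PySem.List.pySetD dp i
            (max (if i ≥ m then PySem.List.pyGetD dp (i - m) 0 else -1)
                 (if i ≥ n then PySem.List.pyGetD dp (i - n) 0 else -1) + 1))
      (List.replicate (t.toNat + 1) (0 : Int))
    = (List.range (t.toNat + 1)).map (G m.toNat n.toNat k) := by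
  induction k with
  | zero =>
    rw [PySem.List.pyRange_one_eq_nil (by simp)]
    simp only [List.foldl_nil]
    apply List.ext_getElem
    · simp
    · intro i h1 h2
      simp only [List.getElem_replicate, List.getElem_map, List.getElem_range, G]
      by_cases h : i = 0
      · subst h; simp [F]
      · simp [h]
  | succ k ih =>
    have hk' : k ≤ t.toNat := by omega
    have hc : ((k + 1 : Nat) : Int) + 1 = ((k : Int) + 1) + 1 := by push_cast; ring
    rw [hc, PySem.List.pyRange_one_succ_right (by omega), List.foldl_append, ih hk']
    simp only [List.foldl_cons, List.foldl_nil]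
    have hfirst :
        (if ((k : Int) + 1) ≥ m then
            PySem.List.pyGetD ((List.range (t.toNat + 1)).map (G m.toNat n.toNat k))
              (((k : Int) + 1) - m) 0
          else -1)
        = (if _h : 0 < m.toNat ∧ m.toNat ≤ k + 1 then F m.toNat n.toNat (k + 1 - m.toNat)
           else -1) := by
      by_cases hcnd : m ≤ (k : Int) + 1
      · rw [if_pos (by omega), pyGetD_map_range _ _ _ (by omega) (by push_cast; omega),
            dif_pos ⟨by omega, by omega⟩]
        have he : ((k : Int) + 1 - m).toNat = k + 1 - m.toNat := by omega
        rw [he]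
        simp only [G]
        rw [if_pos (by omega)]
      · rw [if_neg (by omega), dif_neg (by omega)]
    have hsecond :
        (if ((k : Int) + 1) ≥ n then
            PySem.List.pyGetD ((List.range (t.toNat + 1)).map (G m.toNat n.toNat k))
              (((k : Int) + 1) - n) 0
          else -1)
        = (if _h : 0 < n.toNat ∧ n.toNat ≤ k + 1 then F m.toNat n.toNat (k + 1 - n.toNat)
           else -1) := by
      by_cases hcnd : n ≤ (k : Int) + 1
      · rw [if_pos (by omega), pyGetD_map_range _ _ _ (by omega) (by push_cast; omega),
            dif_pos ⟨by omega, by omega⟩]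
        have he : ((k : Int) + 1 - n).toNat = k + 1 - n.toNat := by omega
        rw [he]
        simp only [G]
        rw [if_pos (by omega)]
      · rw [if_neg (by omega), dif_neg (by omega)]
    have hF : F m.toNat n.toNat (k + 1) =
        if (if _h : 0 < m.toNat ∧ m.toNat ≤ k + 1 then F m.toNat n.toNat (k + 1 - m.toNat)
            else -1) = -1 ∧
           (if _h : 0 < n.toNat ∧ n.toNat ≤ k + 1 then F m.toNat n.toNat (k + 1 - n.toNat)
            else -1) = -1
        then -1
        else max (if _h : 0 < m.toNat ∧ m.toNat ≤ k + 1 then F m.toNat n.toNat (k + 1 - m.toNat)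
                  else -1)
                 (if _h : 0 < n.toNat ∧ n.toNat ≤ k + 1 then F m.toNat n.toNat (k + 1 - n.toNat)
                  else -1) + 1 := by
      rw [F]
    have hset : ∀ v : Int, v = F m.toNat n.toNat (k + 1) →
        PySem.List.pySetD ((List.range (t.toNat + 1)).map (G m.toNat n.toNat k))
          ((k : Int) + 1) v
        = (List.range (t.toNat + 1)).map (G m.toNat n.toNat (k + 1)) := by
      intro v hv
      rw [PySem.List.pySetD_of_nonneg _ _ (by omega)]
      have h1 : ((k : Int) + 1).toNat = k + 1 := by omega
      rw [h1, set_map_range _ _ (by omega)]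
      apply List.map_congr_left
      intro j hj
      simp only [List.mem_range] at hj
      simp only [upd, G]
      by_cases h : j = k + 1
      · subst h; simp [hv]
      · by_cases hjk : j ≤ k
        · simp [h, hjk, show j ≤ k + 1 by omega]
        · simp [h, hjk, show ¬ j ≤ k + 1 by omega]
    rw [hfirst, hsecond]
    by_cases hcond :
        (if _h : 0 < m.toNat ∧ m.toNat ≤ k + 1 then F m.toNat n.toNat (k + 1 - m.toNat)
         else -1) = -1 ∧
        (if _h : 0 < n.toNat ∧ n.toNat ≤ k + 1 then F m.toNat n.toNat (k + 1 - n.toNat)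
         else -1) = -1
    · rw [if_pos hcond, hset (-1) (by rw [hF, if_pos hcond])]
    · rw [if_neg hcond, hset _ (by rw [hF, if_neg hcond])]

lemma pull_eq (m n t : Int) (hm : 1 ≤ m) (hn : 1 ≤ n) (ht : 0 ≤ t) :
    solve_t m n t = (List.range (t.toNat + 1)).map (F m.toNat n.toNat) := by
  simp only [solve_t]
  rw [show (t + 1).toNat = t.toNat + 1 from by omega,
      show t + 1 = ((t.toNat : Int)) + 1 from by omega,
      pull_inv m n t hm hn ht t.toNat le_rfl]
  apply List.map_congr_left
  intro j hj
  simp only [List.mem_range, G] at hj ⊢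
  rw [if_pos (by omega)]

-- ===== A's DP value is the maximal representation count (pull side, semantic) =====

-- F dominates every representation count
lemma F_ub (M N : Nat) (hM : 0 < M) (hN : 0 < N) :
    ∀ i a b : Nat, a * M + b * N = i → (a : Int) + b ≤ F M N i := by
  intro i
  induction i using Nat.strong_induction_on with
  | _ i ih =>
    intro a b hrep
    match a, b with
    | 0, 0 =>
      have hi : i = 0 := by simpa using hrep.symm
      subst hi; simp [F]
    | a + 1, b =>
      have hexp : (a + 1) * M + b * N = a * M + b * N + M := by ring
      rw [hexp] at hrep
      have hMi : M ≤ i := by omega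
      obtain ⟨j, rfl⟩ : ∃ j, i = j + 1 := ⟨i - 1, by omega⟩
      have hprev : a * M + b * N = j + 1 - M := by omega
      have hIH := ih (j + 1 - M) (by omega) a b hprev
      have hFeq : F M N (j + 1)
          = if (if _h : 0 < M ∧ M ≤ j + 1 then F M N (j + 1 - M) else -1) = -1 ∧
               (if _h : 0 < N ∧ N ≤ j + 1 then F M N (j + 1 - N) else -1) = -1
            then -1
            else max (if _h : 0 < M ∧ M ≤ j + 1 then F M N (j + 1 - M) else -1)
                     (if _h : 0 < N ∧ N ≤ j + 1 then F M N (j + 1 - N) else -1) + 1 := by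
        rw [F]
      rw [hFeq, dif_pos ⟨hM, by omega⟩]
      set B := (if _h : 0 < N ∧ N ≤ j + 1 then F M N (j + 1 - N) else -1) with hB
      by_cases hcc : F M N (j + 1 - M) = -1 ∧ B = -1
      · exfalso
        have h0 : (0 : Int) ≤ (a : Int) + b := by positivity
        omega
      · rw [if_neg hcc]
        have hmx := le_max_left (F M N (j + 1 - M)) B
        push_cast
        omega
    | 0, b + 1 =>
      have hexp : 0 * M + (b + 1) * N = 0 * M + b * N + N := by ring
      rw [hexp] at hrep
      have hNi : N ≤ i := by omega
      obtain ⟨j, rfl⟩ : ∃ j, i = j + 1 := ⟨i - 1, by omega⟩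
      have hprev : 0 * M + b * N = j + 1 - N := by omega
      have hIH := ih (j + 1 - N) (by omega) 0 b hprev
      have hFeq : F M N (j + 1)
          = if (if _h : 0 < M ∧ M ≤ j + 1 then F M N (j + 1 - M) else -1) = -1 ∧
               (if _h : 0 < N ∧ N ≤ j + 1 then F M N (j + 1 - N) else -1) = -1
            then -1
            else max (if _h : 0 < M ∧ M ≤ j + 1 then F M N (j + 1 - M) else -1)
                     (if _h : 0 < N ∧ N ≤ j + 1 then F M N (j + 1 - N) else -1) + 1 := by
        rw [F]
      rw [hFeq, dif_pos (show 0 < N ∧ N ≤ j + 1 from ⟨hN, by omega⟩)]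
      set A := (if _h : 0 < M ∧ M ≤ j + 1 then F M N (j + 1 - M) else -1) with hA
      by_cases hcc : A = -1 ∧ F M N (j + 1 - N) = -1
      · exfalso
        have h0 : (0 : Int) ≤ (0 : Int) + b := by positivity
        push_cast at hIH
        omega
      · rw [if_neg hcc]
        have hmx := le_max_right A (F M N (j + 1 - N))
        push_cast at hIH ⊢
        omega

-- F is -1 or achieved by a representation
lemma F_ach (M N : Nat) (hM : 0 < M) (hN : 0 < N) :
    ∀ i : Nat, F M N i = -1 ∨ ∃ a b : Nat, a * M + b * N = i ∧ F M N i = (a : Int) + b := by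
  intro i
  induction i using Nat.strong_induction_on with
  | _ i ih =>
    match i with
    | 0 => exact Or.inr ⟨0, 0, by simp, by simp [F]⟩
    | j + 1 =>
      have hFeq : F M N (j + 1)
          = if (if _h : 0 < M ∧ M ≤ j + 1 then F M N (j + 1 - M) else -1) = -1 ∧
               (if _h : 0 < N ∧ N ≤ j + 1 then F M N (j + 1 - N) else -1) = -1
            then -1
            else max (if _h : 0 < M ∧ M ≤ j + 1 then F M N (j + 1 - M) else -1)
                     (if _h : 0 < N ∧ N ≤ j + 1 then F M N (j + 1 - N) else -1) + 1 := by
        rw [F]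
      set A := (if _h : 0 < M ∧ M ≤ j + 1 then F M N (j + 1 - M) else -1) with hA
      set B := (if _h : 0 < N ∧ N ≤ j + 1 then F M N (j + 1 - N) else -1) with hB
      by_cases hc : A = -1 ∧ B = -1
      · rw [hFeq, if_pos hc]; exact Or.inl rfl
      · right
        rw [hFeq, if_neg hc]
        rcases le_total A B with hle | hle
        · have hBne : B ≠ -1 := by
            intro h
            have hgeA : -1 ≤ A := by rw [hA]; split_ifs; exacts [F_ge M N _, le_refl _]
            exact hc ⟨by omega, h⟩
          have hNle : 0 < N ∧ N ≤ j + 1 := by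
            by_contra h
            rw [hB, dif_neg h] at hBne
            exact hBne rfl
          have hBval : B = F M N (j + 1 - N) := by rw [hB, dif_pos hNle]
          rcases ih (j + 1 - N) (by omega) with h | ⟨a, b, hab, hval⟩
          · exact absurd (by rw [hBval, h]) hBne
          · have hx : (b + 1) * N = b * N + N := by ring
            refine ⟨a, b + 1, by omega, ?_⟩
            rw [max_eq_right hle, hBval, hval]
            push_cast; ring
        · have hAne : A ≠ -1 := by
            intro h
            have hgeB : -1 ≤ B := by rw [hB]; split_ifs; exacts [F_ge M N _, le_refl _]
            exact hc ⟨h, by omega⟩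
          have hMle : 0 < M ∧ M ≤ j + 1 := by
            by_contra h
            rw [hA, dif_neg h] at hAne
            exact hAne rfl
          have hAval : A = F M N (j + 1 - M) := by rw [hA, dif_pos hMle]
          rcases ih (j + 1 - M) (by omega) with h | ⟨a, b, hab, hval⟩
          · exact absurd (by rw [hAval, h]) hAne
          · have hx : (a + 1) * M = a * M + M := by ring
            refine ⟨a + 1, b, by omega, ?_⟩
            rw [max_eq_left hle, hAval, hval]
            push_cast; ring

-- ===== B side: the nested enumeration fold, flattened and read pointwise =====

-- flatten the two nested loops into one fold over the pair list
lemma foldl_foldl_flatMap {α β γ : Type} (L : List α) (Ms : α → List β)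
    (f : γ → α → β → γ) (init : γ) :
    L.foldl (fun acc a => (Ms a).foldl (fun acc2 b => f acc2 a b) acc) init
      = (L.flatMap (fun a => (Ms a).map (fun b => (a, b)))).foldl
          (fun acc p => f acc p.1 p.2) init := by
  induction L generalizing init with
  | nil => simp
  | cons a L ih => simp [List.foldl_append, List.foldl_map, ih]

-- one relax step on a mapped range list, as a pointwise max
lemma relax_step (m n : Int) (T : Nat) (g : Nat → Int) (p : Int × Int)
    (h0 : 0 ≤ p.1 * m + p.2 * n) (h1 : p.1 * m + p.2 * n < (T : Int) + 1) :
    (if p.1 + p.2 > PySem.List.pyGetD ((List.range (T + 1)).map g) (p.1 * m + p.2 * n) 0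
     then PySem.List.pySetD ((List.range (T + 1)).map g) (p.1 * m + p.2 * n) (p.1 + p.2)
     else (List.range (T + 1)).map g)
    = (List.range (T + 1)).map
        (fun j => if j = (p.1 * m + p.2 * n).toNat then max (g j) (p.1 + p.2) else g j) := by
  rw [pyGetD_map_range _ _ _ h0 (by push_cast; omega)]
  by_cases hgt : p.1 + p.2 > g (p.1 * m + p.2 * n).toNat
  · rw [if_pos hgt, PySem.List.pySetD_of_nonneg _ _ h0,
        set_map_range _ _ (show (p.1 * m + p.2 * n).toNat < T + 1 by omega)]
    apply List.map_congr_left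
    intro j _
    simp only [upd]
    by_cases h : j = (p.1 * m + p.2 * n).toNat
    · rw [if_pos h, if_pos h, h, max_eq_right (by omega)]
    · rw [if_neg h, if_neg h]
  · rw [if_neg hgt]
    apply List.map_congr_left
    intro j _
    by_cases h : j = (p.1 * m + p.2 * n).toNat
    · rw [if_pos h, h, max_eq_left (by omega)]
    · rw [if_neg h]

-- the whole flat fold on a mapped range list, as a fold of pointwise maxes
lemma ops_fold (m n : Int) (T : Nat) (ops : List (Int × Int)) (g : Nat → Int)
    (h : ∀ p ∈ ops, 0 ≤ p.1 * m + p.2 * n ∧ p.1 * m + p.2 * n < (T : Int) + 1) :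
    ops.foldl
      (fun dp p =>
        if p.1 + p.2 > PySem.List.pyGetD dp (p.1 * m + p.2 * n) 0
        then PySem.List.pySetD dp (p.1 * m + p.2 * n) (p.1 + p.2) else dp)
      ((List.range (T + 1)).map g)
    = (List.range (T + 1)).map
        (ops.foldl
          (fun g p =>
            fun j => if j = (p.1 * m + p.2 * n).toNat then max (g j) (p.1 + p.2) else g j)
          g) := by
  induction ops generalizing g with
  | nil => simp
  | cons p ops ih =>
    simp only [List.foldl_cons]
    rw [relax_step m n T g p (h p (by simp)).1 (h p (by simp)).2,
        ih _ (fun q hq => h q (by simp [hq]))]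

-- reading the fold of pointwise maxes at one index
lemma fold_relax_apply (m n : Int) (ops : List (Int × Int)) (g : Nat → Int) (j : Nat) :
    (ops.foldl
      (fun g p =>
        fun j => if j = (p.1 * m + p.2 * n).toNat then max (g j) (p.1 + p.2) else g j)
      g) j
    = ops.foldl
        (fun c p => if (p.1 * m + p.2 * n).toNat = j then max c (p.1 + p.2) else c) (g j) := by
  induction ops generalizing g with
  | nil => rfl
  | cons p ops ih =>
    simp only [List.foldl_cons]
    rw [ih]
    congr 1
    by_cases h : (p.1 * m + p.2 * n).toNat = j
    · rw [if_pos h, if_pos h.symm]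
    · rw [if_neg h, if_neg (fun hh => h hh.symm)]

-- the pointwise max fold dominates its initial value and every matching entry
lemma fold_max_ge (m n : Int) (j : Nat) (ops : List (Int × Int)) (init : Int) :
    init ≤ ops.foldl
        (fun c p => if (p.1 * m + p.2 * n).toNat = j then max c (p.1 + p.2) else c) init ∧
    ∀ p ∈ ops, (p.1 * m + p.2 * n).toNat = j →
      p.1 + p.2 ≤ ops.foldl
        (fun c p => if (p.1 * m + p.2 * n).toNat = j then max c (p.1 + p.2) else c) init := by
  induction ops generalizing init with
  | nil => exact ⟨le_rfl, by simp⟩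
  | cons q ops ih =>
    simp only [List.foldl_cons]
    constructor
    · refine le_trans ?_ (ih _).1
      split_ifs <;> omega
    · intro p hp hpj
      rcases List.mem_cons.mp hp with hp | hp
      · subst hp
        refine le_trans ?_ (ih _).1
        rw [if_pos hpj]; omega
      · exact (ih _).2 p hp hpj
  
-- the pointwise max fold is its initial value or achieved by a matching entry
lemma fold_max_ach (m n : Int) (j : Nat) (ops : List (Int × Int)) (init : Int) :
    ops.foldl
        (fun c p => if (p.1 * m + p.2 * n).toNat = j then max c (p.1 + p.2) else c) init = init ∨
    ∃ p ∈ ops, (p.1 * m + p.2 * n).toNat = j ∧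
      ops.foldl
        (fun c p => if (p.1 * m + p.2 * n).toNat = j then max c (p.1 + p.2) else c) init
        = p.1 + p.2 := by
  induction ops generalizing init with
  | nil => exact Or.inl rfl
  | cons q ops ih =>
    simp only [List.foldl_cons]
    by_cases hq : (q.1 * m + q.2 * n).toNat = j
    · rw [if_pos hq]
      rcases ih (max init (q.1 + q.2)) with h | ⟨p, hp, hpj, hval⟩
      · rcases max_cases init (q.1 + q.2) with ⟨he, _⟩ | ⟨he, _⟩
        · exact Or.inl (h.trans he)
        · exact Or.inr ⟨q, List.mem_cons_self .., hq, h.trans he⟩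
      · exact Or.inr ⟨p, List.mem_cons_of_mem q hp, hpj, hval⟩
    · rw [if_neg hq]
      rcases ih init with h | ⟨p, hp, hpj, hval⟩
      · exact Or.inl h
      · exact Or.inr ⟨p, List.mem_cons_of_mem q hp, hpj, hval⟩

-- membership in the enumerated pair list
lemma mem_ops_iff (m n t : Int) (p : Int × Int) :
    p ∈ (PySem.List.pyRange 0 (PySem.Int.floordiv t m + 1) 1).flatMap
          (fun a => (PySem.List.pyRange 0 (PySem.Int.floordiv (t - a * m) n + 1) 1).map
            (fun b => (a, b)))
    ↔ (0 ≤ p.1 ∧ p.1 ≤ PySem.Int.floordiv t m) ∧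
      (0 ≤ p.2 ∧ p.2 ≤ PySem.Int.floordiv (t - p.1 * m) n) := by
  constructor
  · intro h
    rcases List.mem_flatMap.mp h with ⟨a, ha, hb⟩
    rcases List.mem_map.mp hb with ⟨b, hbmem, hpb⟩
    rcases PySem.List.mem_pyRange_one.mp ha with ⟨ha0, ha1⟩
    rcases PySem.List.mem_pyRange_one.mp hbmem with ⟨hb0, hb1⟩
    subst hpb
    exact ⟨⟨ha0, show a ≤ PySem.Int.floordiv t m by omega⟩,
      ⟨hb0, show b ≤ PySem.Int.floordiv (t - a * m) n by omega⟩⟩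
  · rintro ⟨⟨h1, h2⟩, ⟨h3, h4⟩⟩
    refine List.mem_flatMap.mpr ⟨p.1, PySem.List.mem_pyRange_one.mpr ⟨h1, by omega⟩,
      List.mem_map.mpr ⟨p.2, PySem.List.mem_pyRange_one.mpr ⟨h3, by omega⟩, rfl⟩⟩

-- every enumerated pair targets a cell inside the table
lemma ops_bounds (m n t : Int) (hm : 1 ≤ m) (hn : 1 ≤ n) (_ht : 0 ≤ t) (p : Int × Int)
    (hp : p ∈ (PySem.List.pyRange 0 (PySem.Int.floordiv t m + 1) 1).flatMap
          (fun a => (PySem.List.pyRange 0 (PySem.Int.floordiv (t - a * m) n + 1) 1).map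
            (fun b => (a, b)))) :
    0 ≤ p.1 ∧ 0 ≤ p.2 ∧ 0 ≤ p.1 * m + p.2 * n ∧ p.1 * m + p.2 * n ≤ t := by
  rcases (mem_ops_iff m n t p).mp hp with ⟨⟨h1, h2⟩, ⟨h3, h4⟩⟩
  have hma : p.1 * m ≤ t := (PySem.Int.le_floordiv_iff_mul_le (by omega)).mp h2
  have hnb : p.2 * n ≤ t - p.1 * m := (PySem.Int.le_floordiv_iff_mul_le (by omega)).mp h4
  have hpa : 0 ≤ p.1 * m := mul_nonneg h1 (by omega)
  have hpb : 0 ≤ p.2 * n := mul_nonneg h3 (by omega)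
  exact ⟨h1, h3, by omega, by omega⟩

-- every representation of a cell ≤ t is enumerated
lemma rep_mem_ops (m n t : Int) (hm : 1 ≤ m) (hn : 1 ≤ n) (a b : Nat)
    (hrep : (a : Int) * m + (b : Int) * n ≤ t) :
    ((a : Int), (b : Int)) ∈
      (PySem.List.pyRange 0 (PySem.Int.floordiv t m + 1) 1).flatMap
        (fun a => (PySem.List.pyRange 0 (PySem.Int.floordiv (t - a * m) n + 1) 1).map
          (fun b => (a, b))) := by
  have ha0 : (0 : Int) ≤ (a : Int) * m := mul_nonneg (Int.natCast_nonneg a) (by omega)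
  have hb0 : (0 : Int) ≤ (b : Int) * n := mul_nonneg (Int.natCast_nonneg b) (by omega)
  have ham : (a : Int) ≤ PySem.Int.floordiv t m :=
    (PySem.Int.le_floordiv_iff_mul_le (by omega)).mpr (by linarith)
  have hbn : (b : Int) ≤ PySem.Int.floordiv (t - (a : Int) * m) n :=
    (PySem.Int.le_floordiv_iff_mul_le (by omega)).mpr (by linarith)
  exact List.mem_flatMap.mpr ⟨(a : Int),
    PySem.List.mem_pyRange_one.mpr ⟨Int.natCast_nonneg a, by omega⟩,
    List.mem_map.mpr ⟨(b : Int),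
      PySem.List.mem_pyRange_one.mpr ⟨Int.natCast_nonneg b, by omega⟩, rfl⟩⟩

-- ===== VERDICT (by name: the statement is the Claim_ definition above) =====
theorem solve_t_spec : Claim_equal_solve_t := by
  intro m n t _hdom hpre
  unfold Spec_solve_t
  by_cases ht : t < 0
  · have hA : solve_t m n t = [] := by
      simp [solve_t, PySem.List.pyRange_one_eq_nil (show t + 1 ≤ 1 by omega),
            show (t + 1).toNat = 0 by omega]
    have hB : solve_t_alt m n t = [] := by
      simp [solve_t_alt, ht]
    rw [hA, hB]
  · obtain ⟨hm, hn⟩ : 1 ≤ m ∧ 1 ≤ n := hpre.resolve_right ht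
    have ht' : 0 ≤ t := by omega
    set T := t.toNat with hT
    set ops := (PySem.List.pyRange 0 (PySem.Int.floordiv t m + 1) 1).flatMap
      (fun a => (PySem.List.pyRange 0 (PySem.Int.floordiv (t - a * m) n + 1) 1).map
        (fun b => (a, b))) with hops
    have hBval : solve_t_alt m n t
        = (List.range (T + 1)).map
            (fun j => ops.foldl
              (fun c p => if (p.1 * m + p.2 * n).toNat = j then max c (p.1 + p.2) else c)
              (-1)) := by
      simp only [solve_t_alt, if_neg ht]
      have hrep : List.replicate (t + 1).toNat (-1 : Int)
          = (List.range (T + 1)).map (fun _ => (-1 : Int)) := by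
        rw [List.map_const', List.length_range]
        congr 1
        omega
      rw [hrep, foldl_foldl_flatMap, ← hops,
          ops_fold m n T ops _ (fun p hp => by
            have := ops_bounds m n t hm hn ht' p hp
            exact ⟨this.2.2.1, by omega⟩)]
      apply List.map_congr_left
      intro j _
      exact fold_relax_apply m n ops _ j
    rw [pull_eq m n t hm hn ht', hBval]
    apply List.map_congr_left
    intro j hj
    simp only [List.mem_range] at hj
    set c := ops.foldl
      (fun c p => if (p.1 * m + p.2 * n).toNat = j then max c (p.1 + p.2) else c) (-1) with hc
    have hm' : ((m.toNat : Int)) = m := by omega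
    have hn' : ((n.toNat : Int)) = n := by omega
    -- c dominates every representation count of j
    have hub : ∀ a b : Nat, a * m.toNat + b * n.toNat = j → (a : Int) + b ≤ c := by
      intro a b hrepn
      have hsum : (a : Int) * m + (b : Int) * n = (j : Int) := by
        have h0 : ((a * m.toNat + b * n.toNat : Nat) : Int) = (j : Int) := by
          exact_mod_cast hrepn
        push_cast at h0
        rw [hm', hn'] at h0
        linarith
      have hmem := rep_mem_ops m n t hm hn a b (by rw [hsum]; omega)
      have hle := (fold_max_ge m n j ops (-1)).2 ((a : Int), (b : Int)) hmem (by simp [hsum])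
      rw [hc]
      exact hle
    -- c is -1 or a representation count of j
    have hach : c = -1 ∨ ∃ a b : Nat, a * m.toNat + b * n.toNat = j ∧ c = (a : Int) + b := by
      rcases fold_max_ach m n j ops (-1) with h | ⟨p, hp, hpj, hval⟩
      · exact Or.inl (by rw [hc, h])
      · right
        have hb := ops_bounds m n t hm hn ht' p hp
        have hsum : p.1 * m + p.2 * n = (j : Int) := by omega
        refine ⟨p.1.toNat, p.2.toNat, ?_, ?_⟩
        · have h1 : ((p.1.toNat * m.toNat + p.2.toNat * n.toNat : Nat) : Int) = (j : Int) := by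
            push_cast
            rw [hm', hn', show ((p.1.toNat : Int)) = p.1 from by omega,
                show ((p.2.toNat : Int)) = p.2 from by omega]
            linarith
          exact_mod_cast h1
        · rw [hc, hval]
          omega
    -- combine with A's characterisation
    have hMpos : 0 < m.toNat := by omega
    have hNpos : 0 < n.toNat := by omega
    rcases F_ach m.toNat n.toNat hMpos hNpos j with hF | ⟨a, b, hrepn, hFval⟩
    · rcases hach with h | ⟨a, b, hrepn, hval⟩
      · rw [hF, h]
      · exfalso
        have h1 := F_ub m.toNat n.toNat hMpos hNpos j a b hrepn
        rw [hF] at h1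
        have h0 : (0 : Int) ≤ (a : Int) + b := by positivity
        omega
    · have h1 : F m.toNat n.toNat j ≤ c := by rw [hFval]; exact hub a b hrepn
      rcases hach with h | ⟨a', b', hrepn', hval'⟩
      · exfalso
        have h0 : (0 : Int) ≤ (a : Int) + b := by positivity
        rw [h] at h1
        omega
      · have h2 : c ≤ F m.toNat n.toNat j := by
          rw [hval']
          exact F_ub m.toNat n.toNat hMpos hNpos j a' b' hrepn'
        omega
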